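-- pv_equiv track=rewrite | github.com/Andreas-Espelund/UIO_TRIX_IN1000 | 04/inneholder.py | sammenling
-- ===== SOURCE A (Python) =====
-- def sammenling(stringEn,stringTo):
--
--     returstreng = ''
--     for bokstav1 in stringEn:
--         for bokstav2 in stringTo:
--             if bokstav1 == bokstav2:
--                 stringTo = stringTo.replace(bokstav2,'',1)
--                 returstreng += bokstav1
--                 break
--     return returstreng == stringTo
-- ===== SOURCE B (Python) =====
-- def sammenling(stringEn, stringTo):
--     # count both strings once
--     countEn = {}
--     for c in stringEn:
--         countEn[c] = countEn.get(c, 0) + 1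
--     countTo = {}
--     for c in stringTo:
--         countTo[c] = countTo.get(c, 0) + 1
--     # per character, how many occurrences get consumed
--     consumed = {}
--     for c in countTo:
--         consumed[c] = min(countEn.get(c, 0), countTo[c])
--     # one pass over stringEn: keep the first consumed[c] occurrences of each c
--     matched = []
--     taken = {}
--     for c in stringEn:
--         t = taken.get(c, 0)
--         if t < consumed.get(c, 0):
--             taken[c] = t + 1
--             matched.append(c)
--     # one independent pass over stringTo: skip the first consumed[c] occurrences of each c
--     leftover = []
--     skipped = {}
--     for c in stringTo:
--         s = skipped.get(c, 0)
--         if s < consumed.get(c, 0):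
--             skipped[c] = s + 1
--         else:
--             leftover.append(c)
--     return ''.join(matched) == ''.join(leftover)
-- ===== Notes on version B (the rewrite author's own statement) =====
-- stated objective: faster
-- what changed: Replaced the nested scan-and-mutate loop (each stringEn char rescans and rewrites stringTo) by frequency tables built once plus two independent single passes that build the matched and leftover strings by per-character occurrence counts.
import Mathlib
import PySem

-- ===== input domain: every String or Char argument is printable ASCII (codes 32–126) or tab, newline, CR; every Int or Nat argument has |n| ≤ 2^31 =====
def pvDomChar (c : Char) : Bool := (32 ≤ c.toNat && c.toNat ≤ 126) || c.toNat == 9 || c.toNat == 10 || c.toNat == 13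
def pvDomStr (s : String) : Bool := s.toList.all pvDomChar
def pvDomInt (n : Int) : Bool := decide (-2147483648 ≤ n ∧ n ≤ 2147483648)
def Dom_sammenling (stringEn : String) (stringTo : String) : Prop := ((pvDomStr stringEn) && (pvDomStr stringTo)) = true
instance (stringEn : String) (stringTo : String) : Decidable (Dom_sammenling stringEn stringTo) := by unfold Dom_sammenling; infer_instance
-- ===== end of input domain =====

-- B replaces A's nested scan-and-mutate of stringTo by counting tables and two
-- independent single passes (objective: faster).

-- ===== PORT A =====
-- outer 'for bokstav1 in stringEn' with state (returstreng, stringTo);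
-- the inner 'for bokstav2 in stringTo: … break' is the first-match scan find?;
-- stringTo.replace(bokstav2, '', 1) for a single char removes the FIRST occurrence,
-- which is exactly List.erase (it compares with ==).
def sammenling (stringEn : String) (stringTo : String) : Bool :=
  let st := stringEn.toList.foldl
    (fun (st : List Char × List Char) b1 =>
      match st.2.find? (fun b2 => b1 == b2) with
      | some b2 => (st.1 ++ [b1], st.2.erase b2)
      | none => st)
    ([], stringTo.toList)
  st.1 == st.2

-- ===== PORT B =====
-- counts of both strings (the 'countEn'/'countTo' loops of Source B)
def pvCount (s : List Char) : PySem.Dict Char Int :=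
  s.foldl (fun d c => d.insert c (d.getD c 0 + 1)) PySem.Dict.empty

-- the 'consumed' table of Source B ('for c in countTo: consumed[c] = min(…, countTo[c])';
-- c is a key of countTo, so the countTo[c] lookup is its getD)
def pvConsumed (cEn cTo : PySem.Dict Char Int) : PySem.Dict Char Int :=
  cTo.keys.foldl (fun d c => d.insert c (min (cEn.getD c 0) (cTo.getD c 0))) PySem.Dict.empty

def sammenling_alt (stringEn : String) (stringTo : String) : Bool :=
  let consumed := pvConsumed (pvCount stringEn.toList) (pvCount stringTo.toList)
  -- pass over stringEn: keep the first consumed[c] occurrences of each c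
  let matched := stringEn.toList.foldl
    (fun (st : PySem.Dict Char Int × List Char) c =>
      let t := st.1.getD c 0
      if t < consumed.getD c 0 then (st.1.insert c (t + 1), st.2 ++ [c]) else st)
    (PySem.Dict.empty, [])
  -- pass over stringTo: skip the first consumed[c] occurrences of each c
  let leftover := stringTo.toList.foldl
    (fun (st : PySem.Dict Char Int × List Char) c =>
      let s := st.1.getD c 0
      if s < consumed.getD c 0 then (st.1.insert c (s + 1), st.2) else (st.1, st.2 ++ [c]))
    (PySem.Dict.empty, [])
  matched.2 == leftover.2

-- ===== PRECONDITION & SPEC =====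
def Spec_sammenling (stringEn : String) (stringTo : String) (out : Bool) : Prop := out = sammenling_alt stringEn stringTo
instance (stringEn : String) (stringTo : String) (out : Bool) : Decidable (Spec_sammenling stringEn stringTo out) := by unfold Spec_sammenling; infer_instance

-- ===== CLAIM (what is proved, stated in full; the proofs are below) =====
def Claim_equal_sammenling : Prop := ∀ (stringEn : String) (stringTo : String), Dom_sammenling stringEn stringTo → Spec_sammenling stringEn stringTo (sammenling stringEn stringTo)

-- ===== LEMMAS AND PROOFS =====

-- spec-side machinery: "drop the first k(c) occurrences of each char c" and the
-- canonical consume recursion both ports reduce to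
def pvIncr (k : Char → Nat) (c : Char) (x : Char) : Nat := if x = c then k x + 1 else k x
def pvDecr (k : Char → Nat) (c : Char) (x : Char) : Nat := if x = c then k x - 1 else k x

def pvDrop : List Char → (Char → Nat) → List Char
  | [], _ => []
  | c :: rest, k => if 0 < k c then pvDrop rest (pvDecr k c) else c :: pvDrop rest k

def pvGo : List Char → List Char → (Char → Nat) → List Char × (Char → Nat)
  | [], _, k => ([], k)
  | c :: rest, to0, k =>
    if k c < to0.count c then
      let r := pvGo rest to0 (pvIncr k c); (c :: r.1, r.2)
    else pvGo rest to0 k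

theorem pvIncr_self (k : Char → Nat) (c : Char) : pvIncr k c c = k c + 1 := by simp [pvIncr]
theorem pvIncr_ne (k : Char → Nat) (c x : Char) (h : x ≠ c) : pvIncr k c x = k x := by simp [pvIncr, h]
theorem pvDecr_self (k : Char → Nat) (c : Char) : pvDecr k c c = k c - 1 := by simp [pvDecr]
theorem pvDecr_ne (k : Char → Nat) (c x : Char) (h : x ≠ c) : pvDecr k c x = k x := by simp [pvDecr, h]

theorem pvDecr_pvIncr (k : Char → Nat) (c : Char) : pvDecr (pvIncr k c) c = k := by
  funext x
  by_cases hx : x = c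
  · subst hx; simp [pvDecr, pvIncr]
  · simp [pvDecr, pvIncr, hx]

theorem pvIncr_pvDecr (k : Char → Nat) (c : Char) (h : 0 < k c) : pvIncr (pvDecr k c) c = k := by
  funext x
  by_cases hx : x = c
  · subst hx; simp [pvDecr, pvIncr]; omega
  · simp [pvDecr, pvIncr, hx]

theorem pvDrop_zero (l : List Char) : pvDrop l (fun _ => 0) = l := by
  induction l with
  | nil => rfl
  | cons c rest ih => simp [pvDrop, ih]

theorem mem_pvDrop (l : List Char) (k : Char → Nat) (c : Char) :
    c ∈ pvDrop l k ↔ k c < l.count c := by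
  induction l generalizing k with
  | nil => simp [pvDrop]
  | cons d rest ih =>
    by_cases hd : 0 < k d
    · simp only [pvDrop, if_pos hd, ih]
      by_cases hcd : c = d
      · subst hcd; rw [pvDecr_self]; simp; omega
      · rw [pvDecr_ne k d c hcd]; simp [Ne.symm hcd]
    · simp only [pvDrop, if_neg hd, List.mem_cons, ih]
      by_cases hcd : c = d
      · subst hcd; simp; omega
      · simp [hcd, Ne.symm hcd]

theorem erase_pvDrop (l : List Char) (k : Char → Nat) (c : Char) (h : k c < l.count c) :
    (pvDrop l k).erase c = pvDrop l (pvIncr k c) := by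
  induction l generalizing k with
  | nil => simp at h
  | cons d rest ih =>
    by_cases hd : 0 < k d
    · have hd' : 0 < pvIncr k c d := by
        by_cases hdc : d = c
        · subst hdc; rw [pvIncr_self]; omega
        · rw [pvIncr_ne k c d hdc]; exact hd
      simp only [pvDrop, if_pos hd, if_pos hd']
      by_cases hcd : c = d
      · subst hcd
        rw [pvDecr_pvIncr k c, ← pvIncr_pvDecr k c hd, ← ih]
        · rw [pvIncr_pvDecr k c hd]
        · rw [pvDecr_self]; simp at h; omega
      · have hcomm : pvDecr (pvIncr k c) d = pvIncr (pvDecr k d) c := by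
          funext x
          by_cases hx : x = c
          · subst hx; rw [pvDecr_ne _ _ _ hcd, pvIncr_self, pvIncr_self, pvDecr_ne _ _ _ hcd]
          · by_cases hxd : x = d
            · subst hxd; rw [pvDecr_self, pvIncr_ne _ _ _ hx, pvIncr_ne _ _ _ hx, pvDecr_self]
            · rw [pvDecr_ne _ _ _ hxd, pvIncr_ne _ _ _ hx, pvIncr_ne _ _ _ hx, pvDecr_ne _ _ _ hxd]
        rw [hcomm, ← ih]
        simp [Ne.symm hcd] at h
        rw [pvDecr_ne k d c hcd]; omega
    · by_cases hcd : c = d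
      · subst hcd
        have hd' : 0 < pvIncr k c c := by rw [pvIncr_self]; omega
        simp only [pvDrop, if_neg hd, if_pos hd']
        rw [pvDecr_pvIncr k c, List.erase_cons_head]
      · have hd' : ¬ 0 < pvIncr k c d := by rw [pvIncr_ne k c d (Ne.symm hcd)]; exact hd
        simp only [pvDrop, if_neg hd, if_neg hd']
        rw [List.erase_cons_tail (by simp [Ne.symm hcd] : ¬ (d == c) = true), ih]
        simp [Ne.symm hcd] at h; omega

theorem pvGo_snd (en to0 : List Char) (k : Char → Nat) (hk : ∀ x, k x ≤ to0.count x) (x : Char) :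
    (pvGo en to0 k).2 x = min (k x + en.count x) (to0.count x) := by
  induction en generalizing k with
  | nil => simp [pvGo]; have := hk x; omega
  | cons c rest ih =>
    by_cases hc : k c < to0.count c
    · simp only [pvGo, if_pos hc]
      rw [ih (pvIncr k c)
            (by intro y
                by_cases hy : y = c
                · subst hy; rw [pvIncr_self]; omega
                · rw [pvIncr_ne k c y hy]; exact hk y)]
      by_cases hxc : x = c
      · subst hxc; rw [pvIncr_self]; simp; omega
      · rw [pvIncr_ne k c x hxc]; simp [Ne.symm hxc]
    · simp only [pvGo, if_neg hc]
      rw [ih k hk]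
      by_cases hxc : x = c
      · subst hxc; have := hk x; simp; omega
      · simp [Ne.symm hxc]

theorem find_self (l : List Char) (b : Char) :
    l.find? (fun b2 => b == b2) = if b ∈ l then some b else none := by
  induction l with
  | nil => simp
  | cons d rest ih =>
    by_cases hbd : b = d
    · subst hbd; simp [List.find?]
    · have hb : (b == d) = false := by simp [hbd]
      simp [List.find?, hb, ih, hbd]

-- A's inner scan-with-break is a conditional erase
theorem stepA_eq :
    (fun (st : List Char × List Char) b1 =>
      match st.2.find? (fun b2 => b1 == b2) with
      | some b2 => (st.1 ++ [b1], st.2.erase b2)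
      | none => st)
    = (fun (st : List Char × List Char) b1 =>
        if b1 ∈ st.2 then (st.1 ++ [b1], st.2.erase b1) else st) := by
  funext st b1
  rw [find_self]
  by_cases h : b1 ∈ st.2 <;> simp [h]

-- A's loop reduces to pvGo / pvDrop
theorem foldA (en to0 : List Char) (k : Char → Nat) (ret : List Char) :
    en.foldl
      (fun (st : List Char × List Char) b1 =>
        if b1 ∈ st.2 then (st.1 ++ [b1], st.2.erase b1) else st)
      (ret, pvDrop to0 k)
    = (ret ++ (pvGo en to0 k).1, pvDrop to0 ((pvGo en to0 k).2)) := by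
  induction en generalizing k ret with
  | nil => simp [pvGo]
  | cons b1 rest ih =>
    rw [List.foldl_cons]
    by_cases hmem : b1 ∈ pvDrop to0 k
    · have hcnt : k b1 < to0.count b1 := (mem_pvDrop to0 k b1).1 hmem
      rw [if_pos (show b1 ∈ (Prod.mk ret (pvDrop to0 k)).2 from hmem)]
      show rest.foldl
        (fun (st : List Char × List Char) b1 =>
          if b1 ∈ st.2 then (st.1 ++ [b1], st.2.erase b1) else st)
        (ret ++ [b1], (pvDrop to0 k).erase b1) = _
      rw [erase_pvDrop to0 k b1 hcnt, ih (pvIncr k b1) (ret ++ [b1])]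
      simp [pvGo, if_pos hcnt]
    · have hcnt : ¬ k b1 < to0.count b1 := fun h => hmem ((mem_pvDrop to0 k b1).2 h)
      rw [if_neg (show ¬ b1 ∈ (Prod.mk ret (pvDrop to0 k)).2 from hmem)]
      rw [ih k ret]
      simp [pvGo, if_neg hcnt]

-- the count dicts of B
theorem pvCount_getD (s : List Char) (c : Char) :
    (pvCount s).getD c 0 = (s.count c : Int) := by
  rw [show pvCount s = PySem.Dict.counter s from PySem.Dict.foldl_insert_getD_add_one_eq_counter s]
  exact PySem.Dict.getD_counter s c

theorem foldl_insert_fun (l : List Char) (f : Char → Int) (d : PySem.Dict Char Int) (c : Char) :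
    (l.foldl (fun d c => d.insert c (f c)) d).getD c 0 = if c ∈ l then f c else d.getD c 0 := by
  induction l generalizing d with
  | nil => simp
  | cons a rest ih =>
    rw [List.foldl_cons, ih]
    by_cases hc : c ∈ rest
    · simp [hc]
    · by_cases hca : c = a
      · subst hca; simp [hc]
      · simp [hc, hca, PySem.Dict.getD_insert]

theorem pvConsumed_getD (en to0 : List Char) (c : Char) :
    (pvConsumed (pvCount en) (pvCount to0)).getD c 0 = min ((en.count c : Int)) ((to0.count c : Int)) := by
  unfold pvConsumed
  rw [show (fun (d : PySem.Dict Char Int) c => d.insert c (min ((pvCount en).getD c 0) ((pvCount to0).getD c 0)))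
        = (fun d c => d.insert c (min ((en.count c : Int)) ((to0.count c : Int)))) from by
      funext d c; rw [pvCount_getD, pvCount_getD]]
  rw [foldl_insert_fun]
  by_cases hc : c ∈ (pvCount to0).keys
  · simp [hc]
  · have hto : c ∉ to0 := by
      intro hmem
      apply hc
      rw [show pvCount to0 = PySem.Dict.counter to0 from PySem.Dict.foldl_insert_getD_add_one_eq_counter to0,
          PySem.Dict.keys_counter]
      exact (PySem.Set.mem_ofList to0 c).2 hmem
    simp [hc, List.count_eq_zero.2 hto]

-- B's matched pass reduces to pvGo
theorem foldB_matched (consumed : PySem.Dict Char Int) (enFull to0 : List Char)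
    (hcons : ∀ c, consumed.getD c 0 = min ((enFull.count c : Int)) ((to0.count c : Int))) :
    ∀ (en' : List Char) (t : PySem.Dict Char Int) (k : Char → Nat) (acc : List Char),
    (∀ x, t.getD x 0 = (k x : Int)) → (∀ x, k x + en'.count x ≤ enFull.count x) →
    (en'.foldl
      (fun (st : PySem.Dict Char Int × List Char) c =>
        let t := st.1.getD c 0
        if t < consumed.getD c 0 then (st.1.insert c (t + 1), st.2 ++ [c]) else st)
      (t, acc)).2 = acc ++ (pvGo en' to0 k).1 := by
  intro en'
  induction en' with
  | nil => intro t k acc _ _; simp [pvGo]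
  | cons a rest ih =>
    intro t k acc ht hbound
    rw [List.foldl_cons]
    have hkc : k a < enFull.count a := by
      have := hbound a; simp at this; omega
    by_cases hto : k a < to0.count a
    · have htest : t.getD a 0 < consumed.getD a 0 := by
        rw [ht a, hcons a, lt_min_iff]
        constructor
        · exact_mod_cast hkc
        · exact_mod_cast hto
      simp only [htest, reduceIte]
      rw [ih (t.insert a (t.getD a 0 + 1)) (pvIncr k a) (acc ++ [a])
            (by intro x
                rw [PySem.Dict.getD_insert]
                by_cases hxa : x = a
                · subst hxa; simp [pvIncr_self, ht x]
                · simp [hxa, pvIncr_ne k a x hxa, ht x])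
            (by intro x
                have := hbound x
                by_cases hxa : x = a
                · subst hxa; rw [pvIncr_self]
                  simp at this; omega
                · rw [pvIncr_ne k a x hxa]
                  simp [Ne.symm hxa] at this; omega)]
      simp [pvGo, if_pos hto]
    · have htest : ¬ t.getD a 0 < consumed.getD a 0 := by
        rw [ht a, hcons a, lt_min_iff]
        intro hcontra
        exact hto (by exact_mod_cast hcontra.2)
      simp only [htest, reduceIte]
      rw [ih t k acc ht
            (by intro x
                have := hbound x
                by_cases hxa : x = a
                · subst hxa; simp at this; omega
                · simp [Ne.symm hxa] at this; omega)]
      simp [pvGo, if_neg hto]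

-- B's leftover pass reduces to pvDrop
theorem foldB_leftover (consumed : PySem.Dict Char Int) (m : Char → Nat)
    (hm : ∀ c, consumed.getD c 0 = (m c : Int)) :
    ∀ (to' : List Char) (t : PySem.Dict Char Int) (k : Char → Nat) (acc : List Char),
    (∀ x, t.getD x 0 = (k x : Int)) →
    (to'.foldl
      (fun (st : PySem.Dict Char Int × List Char) c =>
        let s := st.1.getD c 0
        if s < consumed.getD c 0 then (st.1.insert c (s + 1), st.2) else (st.1, st.2 ++ [c]))
      (t, acc)).2 = acc ++ pvDrop to' (fun x => m x - k x) := by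
  intro to'
  induction to' with
  | nil => intro t k acc _; simp [pvDrop]
  | cons a rest ih =>
    intro t k acc ht
    rw [List.foldl_cons]
    by_cases htest : t.getD a 0 < consumed.getD a 0
    · have hk : k a < m a := by rw [ht a, hm a] at htest; exact_mod_cast htest
      simp only [htest, reduceIte]
      rw [ih (t.insert a (t.getD a 0 + 1)) (pvIncr k a) acc
            (by intro x
                rw [PySem.Dict.getD_insert]
                by_cases hxa : x = a
                · subst hxa; simp [pvIncr_self, ht x]
                · simp [hxa, pvIncr_ne k a x hxa, ht x])]
      have hfun : (fun x => m x - pvIncr k a x) = pvDecr (fun x => m x - k x) a := by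
        funext x
        by_cases hxa : x = a
        · subst hxa; rw [pvIncr_self, pvDecr_self]; omega
        · rw [pvIncr_ne k a x hxa, pvDecr_ne _ a x hxa]
      rw [hfun]
      simp [pvDrop, show 0 < m a - k a by omega]
    · have hk : ¬ k a < m a := by
        rw [ht a, hm a] at htest
        intro h; exact htest (by exact_mod_cast h)
      simp only [htest, reduceIte]
      rw [ih t k (acc ++ [a]) ht]
      simp [pvDrop, show ¬ 0 < m a - k a by omega]

-- ===== VERDICT (by name: the statement is the Claim_ definition above) =====
theorem sammenling_spec : Claim_equal_sammenling := by
  unfold Claim_equal_sammenling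
  intro sEn sTo _
  unfold Spec_sammenling sammenling sammenling_alt
  rw [stepA_eq]
  have hA := foldA sEn.toList sTo.toList (fun _ => 0) []
  rw [pvDrop_zero] at hA
  rw [hA]
  simp only []
  have hM := foldB_matched (pvConsumed (pvCount sEn.toList) (pvCount sTo.toList))
      sEn.toList sTo.toList (pvConsumed_getD sEn.toList sTo.toList)
      sEn.toList PySem.Dict.empty (fun _ => 0) []
      (by intro x; simp) (by intro x; simp)
  have hL := foldB_leftover (pvConsumed (pvCount sEn.toList) (pvCount sTo.toList))
      (fun c => min (sEn.toList.count c) (sTo.toList.count c))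
      (by intro c; rw [pvConsumed_getD]; push_cast; ring)
      sTo.toList PySem.Dict.empty (fun _ => 0) []
      (by intro x; simp)
  rw [hM, hL]
  have hsnd : (pvGo sEn.toList sTo.toList (fun _ => 0)).2
      = (fun x => min (sEn.toList.count x) (sTo.toList.count x)) := by
    funext x
    rw [pvGo_snd sEn.toList sTo.toList (fun _ => 0) (fun _ => Nat.zero_le _) x]
    simp
  rw [hsnd]
  simp
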